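-- pv_equiv track=rewrite | github.com/sweetnight19/InfoHunter | src/riesgos/evaluacion.py | evaluar_cumplimiento_legal
-- ===== SOURCE A (Python) =====
-- def evaluar_cumplimiento_legal(datos):
--     riesgo_cumplimiento = 0
--
--     # Evaluar el nivel de riesgo de cumplimiento legal para cada red social en los datos
--     for red_social, datos_red_social in datos.items():
--         if red_social == "Reddit":
--             # Evaluar el riesgo de cumplimiento legal en los datos de Reddit
--             if "status" in datos_red_social:
--                 status = datos_red_social["status"]
--                 if "is_nsfw" in status:
--                     is_nsfw = status["is_nsfw"]
--                     # Verificar si el contenido asociado al perfil es considerado para adultos (NSFW)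
--                     if is_nsfw == "True":
--                         riesgo_cumplimiento += 3
--
--         # Agrega más condiciones para evaluar el riesgo de cumplimiento legal en otras redes sociales
--
--     return riesgo_cumplimiento
-- ===== SOURCE B (Python) =====
-- def evaluar_cumplimiento_legal(datos):
--     red = datos.get("Reddit")
--     if red is None:
--         return 0
--     status = red.get("status")
--     if status is None:
--         return 0
--     return 3 if status.get("is_nsfw") == "True" else 0
-- ===== Notes on version B (the rewrite author's own statement) =====
-- stated objective: simpler
-- what changed: Replaces the scan over every social network with a direct guarded chain of dict.get lookups for the single key 'Reddit'; Pre_ excludes association lists listing the key 'Reddit' more than once, which cannot arise from a Python dict (duplicate keys collapse).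
import Mathlib
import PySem

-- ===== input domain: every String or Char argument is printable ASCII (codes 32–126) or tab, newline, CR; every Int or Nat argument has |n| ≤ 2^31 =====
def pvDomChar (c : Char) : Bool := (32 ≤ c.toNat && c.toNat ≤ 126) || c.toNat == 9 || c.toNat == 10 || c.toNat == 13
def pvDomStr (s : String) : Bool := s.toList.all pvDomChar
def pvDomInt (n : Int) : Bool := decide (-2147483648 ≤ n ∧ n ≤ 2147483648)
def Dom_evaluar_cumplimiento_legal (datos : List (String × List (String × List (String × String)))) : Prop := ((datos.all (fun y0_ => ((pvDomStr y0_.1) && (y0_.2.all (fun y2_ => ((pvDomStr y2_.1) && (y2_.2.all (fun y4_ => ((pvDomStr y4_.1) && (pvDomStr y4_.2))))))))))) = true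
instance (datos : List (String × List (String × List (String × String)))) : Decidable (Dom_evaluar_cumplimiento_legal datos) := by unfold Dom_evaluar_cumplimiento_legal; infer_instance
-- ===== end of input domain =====

-- B replaces A's loop over every social network by a direct guarded chain of lookups
-- for the single key "Reddit" (objective: simpler). Same return value on Pre_.

-- first-match association-list lookup = Python dict lookup (dict → assoc list convention)
def pvLookup {ν : Type} (d : List (String × ν)) (k : String) : Option ν :=
  match d with
  | [] => none
  | (k', v) :: t => if k' == k then some v else pvLookup t k

-- ===== PORT A =====
-- A: fold over all (red_social, datos_red_social) items, accumulating riesgo_cumplimiento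
def evaluar_cumplimiento_legal (datos : List (String × List (String × List (String × String)))) : Int :=
  datos.foldl (fun acc p =>
    if p.1 == "Reddit" then
      match pvLookup p.2 "status" with        -- 'if "status" in …' then '["status"]'
      | some status =>
        match pvLookup status "is_nsfw" with   -- 'if "is_nsfw" in …' then '["is_nsfw"]'
        | some is_nsfw => if is_nsfw == "True" then acc + 3 else acc
        | none => acc
      | none => acc
    else acc) 0

-- ===== PORT B =====
def evaluar_cumplimiento_legal_alt (datos : List (String × List (String × List (String × String)))) : Int :=
  match pvLookup datos "Reddit" with
  | none => 0
  | some red =>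
    match pvLookup red "status" with
    | none => 0
    | some status => if pvLookup status "is_nsfw" == some "True" then 3 else 0

-- ===== PRECONDITION & SPEC =====
-- Pre_ excludes association lists that list the key "Reddit" more than once: such inputs
-- cannot arise from a Python dict (duplicate keys collapse in the literal), so the
-- assoc-list behaviour there is an artefact of the representation, not of A.
def Pre_evaluar_cumplimiento_legal (datos : List (String × List (String × List (String × String)))) : Prop :=
  (datos.map Prod.fst).count "Reddit" ≤ 1
instance (datos : List (String × List (String × List (String × String)))) : Decidable (Pre_evaluar_cumplimiento_legal datos) := by unfold Pre_evaluar_cumplimiento_legal; infer_instance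

def pvWitness_evaluar_cumplimiento_legal : (List (String × List (String × List (String × String)))) :=
  [("Reddit", [("status", [("is_nsfw", "True")])]), ("Twitter", [])]

def Spec_evaluar_cumplimiento_legal (datos : List (String × List (String × List (String × String)))) (out : Int) : Prop := out = evaluar_cumplimiento_legal_alt datos
instance (datos : List (String × List (String × List (String × String)))) (out : Int) : Decidable (Spec_evaluar_cumplimiento_legal datos out) := by unfold Spec_evaluar_cumplimiento_legal; infer_instance

-- ===== CLAIM (what is proved, stated in full; the proofs are below) =====
def Claim_equal_evaluar_cumplimiento_legal : Prop := ∀ (datos : List (String × List (String × List (String × String)))), Dom_evaluar_cumplimiento_legal datos → Pre_evaluar_cumplimiento_legal datos → Spec_evaluar_cumplimiento_legal datos (evaluar_cumplimiento_legal datos)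

-- ===== LEMMAS AND PROOFS =====

-- contribution of one Reddit entry
def pvContrib (v : List (String × List (String × String))) : Int :=
  match pvLookup v "status" with
  | none => 0
  | some status => if pvLookup status "is_nsfw" == some "True" then 3 else 0

lemma foldA_no_reddit (t : List (String × List (String × List (String × String)))) (acc : Int)
    (h : (t.map Prod.fst).count "Reddit" = 0) :
    t.foldl (fun acc p =>
      if p.1 == "Reddit" then
        match pvLookup p.2 "status" with
        | some status =>
          match pvLookup status "is_nsfw" with
          | some is_nsfw => if is_nsfw == "True" then acc + 3 else acc
          | none => acc
        | none => acc
      else acc) acc = acc := by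
  induction t generalizing acc with
  | nil => rfl
  | cons p t ih =>
    simp only [List.map_cons, List.count_cons] at h
    have hp : (p.1 == "Reddit") = false := by
      simp only [beq_eq_false_iff_ne, ne_eq]
      intro he; simp [he] at h
    simp only [List.foldl_cons, hp, Bool.false_eq_true, if_false]
    exact ih acc (by omega)

lemma step_eq (acc : Int) (p : String × List (String × List (String × String))) (hp : p.1 = "Reddit") :
    (if p.1 == "Reddit" then
      match pvLookup p.2 "status" with
      | some status =>
        match pvLookup status "is_nsfw" with
        | some is_nsfw => if is_nsfw == "True" then acc + 3 else acc
        | none => acc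
      | none => acc
    else acc) = acc + pvContrib p.2 := by
  simp only [hp, beq_self_eq_true, if_true, pvContrib]
  cases hs : pvLookup p.2 "status" with
  | none => simp
  | some status =>
    cases hn : pvLookup status "is_nsfw" with
    | none => simp [hn]
    | some is_nsfw =>
      by_cases h : is_nsfw = "True" <;> simp [hn, h]

theorem evaluar_cumplimiento_legal_eq (datos : List (String × List (String × List (String × String))))
    (hpre : Pre_evaluar_cumplimiento_legal datos) :
    evaluar_cumplimiento_legal datos = evaluar_cumplimiento_legal_alt datos := by
  induction datos with
  | nil => rfl
  | cons p t ih =>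
    unfold Pre_evaluar_cumplimiento_legal at hpre ih
    simp only [List.map_cons, List.count_cons] at hpre
    by_cases hp : p.1 = "Reddit"
    · -- first entry is Reddit: rest has no Reddit key
      have ht : (t.map Prod.fst).count "Reddit" = 0 := by
        simp [hp] at hpre; omega
      unfold evaluar_cumplimiento_legal evaluar_cumplimiento_legal_alt
      simp only [List.foldl_cons]
      rw [step_eq 0 p hp, foldA_no_reddit t _ ht]
      simp only [pvLookup, hp, beq_self_eq_true, if_true, pvContrib]
      cases hs : pvLookup p.2 "status" <;> simp
    · have ih' := ih (by omega)
      have hp' : (p.1 == "Reddit") = false := by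
        simp only [beq_eq_false_iff_ne, ne_eq]; exact hp
      unfold evaluar_cumplimiento_legal at ih' ⊢
      unfold evaluar_cumplimiento_legal_alt at ih' ⊢
      simp only [List.foldl_cons, pvLookup, hp', Bool.false_eq_true, if_false]
      exact ih'

-- ===== VERDICT (by name: the statement is the Claim_ definition above) =====
theorem evaluar_cumplimiento_legal_spec : Claim_equal_evaluar_cumplimiento_legal := by
  intro datos _ hpre
  unfold Spec_evaluar_cumplimiento_legal
  exact evaluar_cumplimiento_legal_eq datos hpre
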